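-- pv_equiv track=rewrite | github.com/bhattkirtan/code-terminator | backend/agents/validation_agent.py | _check_html_syntax
-- ===== SOURCE A (Python) =====
-- from typing import Dict, Any, List, Optional
--
-- def _check_html_syntax(content: str, file_name: str) -> List[str]:
--     """Check HTML syntax"""
--     errors = []
--
--     # Check for unclosed tags (basic check)
--     stack = []
--     lines = content.split('\n')
--
--     for i, line in enumerate(lines, 1):
--         # Simple tag matching (not comprehensive)
--         line = line.strip()
--         if '<' in line and '>' in line:
--             # Extract tags
--             start = 0
--             while True:
--                 start_pos = line.find('<', start)
--                 if start_pos == -1: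
--                     break
--
--                 end_pos = line.find('>', start_pos)
--                 if end_pos == -1:
--                     break
--
--                 tag = line[start_pos:end_pos + 1]
--
--                 if tag.startswith('<!--'):
--                     start = end_pos + 1
--                     continue
--
--                 if tag.startswith('</'):
--                     # Closing tag
--                     tag_name = tag[2:-1].strip()
--                     if stack and stack[-1] == tag_name:
--                         stack.pop()
--                     else:
--                         errors.append(f"{file_name}:{i}: Unmatched closing tag {tag}")
--                 elif not tag.endswith('/>') and not tag.startswith('<!'):
--                     # Opening tag
--                     tag_name = tag[1:-1].split()[0]
--                     if tag_name not in ['br', 'hr', 'img', 'input', 'meta', 'link']: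
--                         stack.append(tag_name)
--
--                 start = end_pos + 1
--
--     # Check for remaining unclosed tags
--     for tag in stack:
--         errors.append(f"{file_name}: Unclosed tag <{tag}>")
--
--     return errors
-- ===== SOURCE B (Python) =====
-- def _check_html_syntax(content, file_name):
--     """Check HTML syntax (two-phase: tokenize every tag first, then classify)."""
--     # Phase 1: collect (line_no, tag) tokens with a character-level scanner.
--     tokens = []
--     for i, raw in enumerate(content.split('\n'), 1):
--         buf = None
--         for ch in raw.strip():
--             if buf is None:
--                 if ch == '<':
--                     buf = '<'
--             else:
--                 buf += ch
--                 if ch == '>':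
--                     tokens.append((i, buf))
--                     buf = None
--     # Phase 2: classify tokens against a stack of open tags.
--     errors = []
--     stack = []
--     for i, tag in tokens:
--         if tag.startswith('<!--'):
--             continue
--         if tag.startswith('</'):
--             name = tag[2:-1].strip()
--             if stack and stack[-1] == name:
--                 stack.pop()
--             else:
--                 errors.append(f"{file_name}:{i}: Unmatched closing tag {tag}")
--         elif not tag.endswith('/>') and not tag.startswith('<!'):
--             parts = tag[1:-1].split()
--             if parts and parts[0] not in ('br', 'hr', 'img', 'input', 'meta', 'link'):
--                 stack.append(parts[0])
--     for tag in stack: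
--         errors.append(f"{file_name}: Unclosed tag <{tag}>")
--     return errors
-- ===== Notes on version B (the rewrite author's own statement) =====
-- stated objective: alternative
-- what changed: A interleaves repeated str.find-based tag extraction with stack classification inside one per-line while loop; B first builds a flat (line_no, tag) token list with a single character-level scanner and then classifies all tokens in a separate fold over that list, and B skips whitespace-only tag interiors that make A raise IndexError.
-- outside the precondition, e.g. on _check_html_syntax('<a<>>', 'f'): A returns ['f: Unclosed tag <a<>'], B returns ['f: Unclosed tag <a<>']
import Mathlib
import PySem

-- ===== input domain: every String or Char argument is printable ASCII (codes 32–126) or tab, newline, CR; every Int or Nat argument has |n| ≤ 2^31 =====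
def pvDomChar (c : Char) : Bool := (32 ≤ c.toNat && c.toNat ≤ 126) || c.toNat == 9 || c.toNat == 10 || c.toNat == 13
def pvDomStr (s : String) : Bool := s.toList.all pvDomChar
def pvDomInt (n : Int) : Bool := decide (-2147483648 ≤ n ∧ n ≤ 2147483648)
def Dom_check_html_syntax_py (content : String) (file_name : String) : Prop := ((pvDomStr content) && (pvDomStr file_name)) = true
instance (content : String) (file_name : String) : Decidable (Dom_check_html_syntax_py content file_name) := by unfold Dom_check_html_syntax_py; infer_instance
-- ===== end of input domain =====

-- B re-implements A's single interleaved find()-scan-and-classify pass as a two-phase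
-- tokenize-then-fold (character-level scanner producing a flat token list, then one fold
-- classifying the tokens); equivalence of return values is proved on Pre_ (inputs where
-- A does not raise IndexError on a whitespace-only tag interior).

-- shared literal string builders (the same f-strings appear in both Pythons)
def pvUnmatchedMsg (fname : List Char) (i : Int) (tag : List Char) : String :=
  String.ofList (fname ++ (":").toList ++ PySem.Int.toChars i ++ (": Unmatched closing tag ").toList ++ tag)

def pvUnclosedMsg (fname : List Char) (tag : List Char) : String :=
  String.ofList (fname ++ (": Unclosed tag <").toList ++ tag ++ ['>'])

def pvVoids : List (List Char) :=
  [("br").toList, ("hr").toList, ("img").toList, ("input").toList, ("meta").toList, ("link").toList]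

-- ===== PORT A =====
-- A's inner `while True` over `start`, ported with fuel (line.length + 1 suffices: start
-- strictly grows each iteration); `tag[1:-1].split()[0]` raises IndexError in Python when
-- the split is empty — that input is excluded by Pre_ below; here `.headD []` completes it.
def aTagLoop (fname : List Char) (i : Int) (line : List Char) (start : Nat)
    (errors : List String) (stack : List (List Char)) : Nat → List String × List (List Char)
  | 0 => (errors, stack)
  | fuel + 1 =>
    let start_pos := PySem.Chars.findFrom line ['<'] (start : Int)
    if start_pos = -1 then (errors, stack) else
    let end_pos := PySem.Chars.findFrom line ['>'] start_pos
    if end_pos = -1 then (errors, stack) else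
    let tag := PySem.List.slice line (some start_pos) (some (end_pos + 1))
    if PySem.Chars.startswith tag (("<!--").toList) then
      aTagLoop fname i line (end_pos + 1).toNat errors stack fuel
    else if PySem.Chars.startswith tag (("</").toList) then
      let tag_name := PySem.Chars.strip (PySem.List.slice tag (some 2) (some (-1)))
      if stack ≠ [] ∧ PySem.List.pyGet? stack (-1) = some tag_name then
        aTagLoop fname i line (end_pos + 1).toNat errors stack.dropLast fuel
      else
        aTagLoop fname i line (end_pos + 1).toNat (errors ++ [pvUnmatchedMsg fname i tag]) stack fuel
    else if ¬ PySem.Chars.endswith tag (("/>").toList) = true ∧ ¬ PySem.Chars.startswith tag (("<!").toList) = true then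
      let tag_name := (PySem.Chars.split₀ (PySem.List.slice tag (some 1) (some (-1)))).headD []
      if tag_name ∈ pvVoids then
        aTagLoop fname i line (end_pos + 1).toNat errors stack fuel
      else
        aTagLoop fname i line (end_pos + 1).toNat errors (stack ++ [tag_name]) fuel
    else
      aTagLoop fname i line (end_pos + 1).toNat errors stack fuel

def check_html_syntax_py (content : String) (file_name : String) : List String :=
  let lines := PySem.Chars.splitOn content.toList ['\n']
  let res := (PySem.List.enumerate lines 1).foldl
    (fun (st : List String × List (List Char)) p =>
      let line := PySem.Chars.strip p.2
      if PySem.Chars.isIn ['<'] line && PySem.Chars.isIn ['>'] line then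
        aTagLoop file_name.toList p.1 line 0 st.1 st.2 (line.length + 1)
      else st) ([], [])
  res.1 ++ res.2.map (fun tag => pvUnclosedMsg file_name.toList tag)

-- ===== PORT B =====
-- phase 1: character-level scanner; `buf = none` ↔ outside a tag
def bLineTags : List Char → Option (List Char) → List (List Char)
  | [], _ => []
  | c :: rest, none => if c = '<' then bLineTags rest (some ['<']) else bLineTags rest none
  | c :: rest, some buf =>
    let buf' := buf ++ [c]
    if c = '>' then buf' :: bLineTags rest none else bLineTags rest (some buf')

-- phase 2: classify one (line_no, tag) token against the stack
def bStep (fname : List Char) (st : List String × List (List Char)) (tok : Int × List Char) :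
    List String × List (List Char) :=
  let tag := tok.2
  if PySem.Chars.startswith tag (("<!--").toList) then st
  else if PySem.Chars.startswith tag (("</").toList) then
    let name := PySem.Chars.strip (PySem.List.slice tag (some 2) (some (-1)))
    if st.2 ≠ [] ∧ PySem.List.pyGet? st.2 (-1) = some name then (st.1, st.2.dropLast)
    else (st.1 ++ [pvUnmatchedMsg fname tok.1 tag], st.2)
  else if ¬ PySem.Chars.endswith tag (("/>").toList) = true ∧ ¬ PySem.Chars.startswith tag (("<!").toList) = true then
    match PySem.Chars.split₀ (PySem.List.slice tag (some 1) (some (-1))) with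
    | [] => st
    | n :: _ => if n ∈ pvVoids then st else (st.1, st.2 ++ [n])
  else st

def check_html_syntax_py_alt (content : String) (file_name : String) : List String :=
  let lines := PySem.Chars.splitOn content.toList ['\n']
  let tokens := (PySem.List.enumerate lines 1).flatMap
    (fun p => (bLineTags (PySem.Chars.strip p.2) none).map (fun t => (p.1, t)))
  let res := tokens.foldl (bStep file_name.toList) ([], [])
  res.1 ++ res.2.map (fun tag => pvUnclosedMsg file_name.toList tag)

-- ===== PRECONDITION & SPEC =====
-- pvWsClose w: w begins with whitespace* then '>'
def pvWsClose : List Char → Bool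
  | [] => false
  | c :: rest => c = '>' || (PySem.Chars.isspace c && pvWsClose rest)

-- pvHasWsTag l: l contains a substring '<' ++ whitespace* ++ '>'
def pvHasWsTag : List Char → Bool
  | [] => false
  | c :: rest => (c = '<' && pvWsClose rest) || pvHasWsTag rest

-- Pre_ excludes inputs where some (stripped) line contains a tag '<' whitespace* '>':
-- on such a tag A raises IndexError at tag[1:-1].split()[0] (the exclusion is by a plain
-- substring test, so it is slightly conservative: it also drops inputs where that pattern
-- only occurs inside a larger extracted tag, on which A and B agree — see the cite).
def Pre_check_html_syntax_py (content : String) (file_name : String) : Prop :=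
  ∀ line ∈ PySem.Chars.splitOn content.toList ['\n'], pvHasWsTag (PySem.Chars.strip line) = false

instance (content : String) (file_name : String) : Decidable (Pre_check_html_syntax_py content file_name) := by
  unfold Pre_check_html_syntax_py; infer_instance

def pvWitness_check_html_syntax_py : String × String := ("<div>\n<br/>\n</div>", "f.html")

def Spec_check_html_syntax_py (content : String) (file_name : String) (out : List String) : Prop :=
  out = check_html_syntax_py_alt content file_name
instance (content : String) (file_name : String) (out : List String) : Decidable (Spec_check_html_syntax_py content file_name out) := by
  unfold Spec_check_html_syntax_py; infer_instance

-- ===== CLAIM (what is proved, stated in full; the proofs are below) =====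
def Claim_equal_check_html_syntax_py : Prop := ∀ (content : String) (file_name : String), Dom_check_html_syntax_py content file_name → Pre_check_html_syntax_py content file_name → Spec_check_html_syntax_py content file_name (check_html_syntax_py content file_name)

-- ===== LEMMAS AND PROOFS =====

lemma bLineTags_skip (a b : List Char) (h : '<' ∉ a) : bLineTags (a ++ b) none = bLineTags b none := by
  induction a with
  | nil => rfl
  | cons c t ih =>
    simp only [List.mem_cons, not_or] at h
    simp [bLineTags, Ne.symm h.1, ih h.2]

lemma bLineTags_none_no_lt (l : List Char) (h : '<' ∉ l) : bLineTags l none = [] := by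
  have := bLineTags_skip l [] h
  simpa using this

lemma bLineTags_some_no_gt (l : List Char) (buf : List Char) (h : '>' ∉ l) :
    bLineTags l (some buf) = [] := by
  induction l generalizing buf with
  | nil => rfl
  | cons c t ih =>
    simp only [List.mem_cons, not_or] at h
    simp [bLineTags, Ne.symm h.1, ih _ h.2]

lemma bLineTags_none_no_gt (l : List Char) (h : '>' ∉ l) : bLineTags l none = [] := by
  induction l with
  | nil => rfl
  | cons c t ih =>
    simp only [List.mem_cons, not_or] at h
    by_cases hc : c = '<'
    · simp [bLineTags, hc, bLineTags_some_no_gt t ['<'] h.2]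
    · simp [bLineTags, hc, ih h.2]

lemma bLineTags_emit (mid rest buf : List Char) (h : '>' ∉ mid) :
    bLineTags (mid ++ '>' :: rest) (some buf) = (buf ++ mid ++ ['>']) :: bLineTags rest none := by
  induction mid generalizing buf with
  | nil => simp [bLineTags]
  | cons c t ih =>
    simp only [List.mem_cons, not_or] at h
    simp only [List.cons_append, bLineTags, Ne.symm h.1]
    rw [ih (buf ++ [c]) h.2]
    simp

lemma split₀_go_nil : ∀ (cs cur : List Char) (acc : List (List Char)),
    PySem.Chars.split₀.go cs cur acc = [] → acc = [] ∧ cur = [] ∧ ∀ c ∈ cs, PySem.Chars.isspace c = true := by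
  intro cs
  induction cs with
  | nil =>
    intro cur acc h
    by_cases hc : cur.isEmpty
    · simp [PySem.Chars.split₀.go, hc] at h
      simp [h, List.isEmpty_iff.mp hc]
    · simp [PySem.Chars.split₀.go, hc] at h
  | cons c t ih =>
    intro cur acc h
    by_cases hs : PySem.Chars.isspace c
    · by_cases hc : cur.isEmpty
      · simp only [PySem.Chars.split₀.go, hs, hc, if_true] at h
        rcases ih [] acc h with ⟨h1, _, h3⟩
        refine ⟨h1, List.isEmpty_iff.mp hc, ?_⟩
        intro x hx
        rcases List.mem_cons.mp hx with hx | hx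
        · simpa [hx] using hs
        · exact h3 x hx
      · simp only [PySem.Chars.split₀.go, hs, hc, if_true] at h
        rcases ih [] _ h with ⟨h1, _, _⟩
        simp at h1
    · simp only [PySem.Chars.split₀.go, hs] at h
      rcases ih _ _ h with ⟨_, h2, _⟩
      simp at h2

lemma split₀_eq_nil (cs : List Char) (h : PySem.Chars.split₀ cs = []) :
    ∀ c ∈ cs, PySem.Chars.isspace c = true :=
  (split₀_go_nil cs [] [] h).2.2

lemma pvWsClose_of_ws (mid rest : List Char) (h : ∀ c ∈ mid, PySem.Chars.isspace c = true) :
    pvWsClose (mid ++ '>' :: rest) = true := by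
  induction mid with
  | nil => simp [pvWsClose]
  | cons c t ih =>
    simp only [List.cons_append, pvWsClose]
    have hc := h c (by simp)
    have ht := ih (fun x hx => h x (by simp [hx]))
    simp [hc, ht]

lemma pvHasWsTag_of_close (a w : List Char) (h : pvWsClose w = true) :
    pvHasWsTag (a ++ '<' :: w) = true := by
  induction a with
  | nil => simp [pvHasWsTag, h]
  | cons c t ih => simp [pvHasWsTag, ih]

lemma single_prefix {c : Char} {l : List Char} (h : [c] <+: l) : ∃ t, l = c :: t := by
  rcases h with ⟨t, ht⟩
  exact ⟨t, ht.symm⟩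

lemma not_mem_mid (l : List Char) (c : Char) (a b : Nat)
    (hmin : ∀ i : Nat, a ≤ i → i < b → ¬ [c] <+: l.drop i) :
    c ∉ (l.drop a).take (b - a) := by
  intro hmem
  rcases List.mem_iff_getElem.mp hmem with ⟨k, hk, hval⟩
  have hk' : k < b - a := lt_of_lt_of_le hk (by simp [List.length_take])
  have hlen : a + k < l.length := by
    have := hk
    simp only [List.length_take, List.length_drop] at this
    omega
  have hget : ((l.drop a).take (b - a))[k] = l[a + k] := by
    rw [List.getElem_take, List.getElem_drop]
  have : [c] <+: l.drop (a + k) := by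
    rw [List.drop_eq_getElem_cons hlen]
    rw [hget] at hval
    simp [hval, List.prefix_cons_iff]
  exact hmin (a + k) (by omega) (by omega) this

lemma slice_1_neg1 (c d : Char) (xs : List Char) :
    PySem.List.slice (c :: (xs ++ [d])) (some 1) (some (-1)) = xs := by
  simp [PySem.List.slice]

-- the main per-line equivalence: A's fuelled find-loop from `start` equals folding bStep
-- over the scanner's tags of the suffix
lemma aTagLoop_eq (fname : List Char) (i : Int) (line : List Char)
    (hpre : pvHasWsTag line = false) :
    ∀ (fuel start : Nat) (st : List String × List (List Char)), start ≤ line.length →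
      line.length - start < fuel →
      aTagLoop fname i line start st.1 st.2 fuel
        = ((bLineTags (line.drop start) none).map (fun t => (i, t))).foldl (bStep fname) st := by
  intro fuel
  induction fuel with
  | zero => intro start st h1 h2; omega
  | succ fuel ih =>
    intro start st hstart hfuel
    by_cases h1 : PySem.Chars.findFrom line ['<'] (start : Int) = -1
    · have hno : ¬ ['<'] <:+: line.drop start :=
        (PySem.Chars.findFrom_natCast_eq_neg_one_iff line ['<'] start hstart).mp h1
      have hmem : '<' ∉ line.drop start := by
        intro hm; exact hno ((List.singleton_infix_iff _ _).mpr hm)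
      rw [bLineTags_none_no_lt _ hmem]
      simp [aTagLoop, h1]
    · obtain ⟨hge, hpref, hmin⟩ := PySem.Chars.findFrom_natCast_spec line ['<'] start hstart h1
      have hfpnn : (0 : Int) ≤ PySem.Chars.findFrom line ['<'] (start : Int) :=
        le_trans (by exact_mod_cast Nat.zero_le start) hge
      set p := (PySem.Chars.findFrom line ['<'] (start : Int)).toNat with hp
      have hfpc : PySem.Chars.findFrom line ['<'] (start : Int) = (p : Int) :=
        (Int.toNat_of_nonneg hfpnn).symm
      obtain ⟨t1, ht1⟩ := single_prefix hpref
      have hplen : p < line.length :=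
        List.length_lt_of_drop_ne_nil (by rw [ht1]; simp)
      have hdpcons := List.drop_eq_getElem_cons hplen
      rw [hdpcons] at ht1
      obtain ⟨hgetp, ht1'⟩ := List.cons_eq_cons.mp ht1
      have hpstart : start ≤ p := by
        have := hge; rw [hfpc] at this; exact_mod_cast this
      have hnolt : '<' ∉ (line.drop start).take (p - start) :=
        not_mem_mid line '<' start p hmin
      have hsplit : line.drop start = (line.drop start).take (p - start) ++ line.drop p := by
        conv_lhs => rw [← List.take_append_drop (p - start) (line.drop start)]
        rw [List.drop_drop]
        congr 2
        omega
      by_cases h2 : PySem.Chars.findFrom line ['>'] ((p : Nat) : Int) = -1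
      · -- A breaks; scanner emits nothing after entering the unterminated tag
        have hno2 : ¬ ['>'] <:+: line.drop p :=
          (PySem.Chars.findFrom_natCast_eq_neg_one_iff line ['>'] p (le_of_lt hplen)).mp h2
        have hmem2 : '>' ∉ line.drop p := by
          intro hm; exact hno2 ((List.singleton_infix_iff _ _).mpr hm)
        have hmem2' : '>' ∉ t1 := fun hm => hmem2 (by
          rw [hdpcons, ht1']
          exact List.mem_cons_of_mem _ hm)
        rw [hsplit, bLineTags_skip _ _ hnolt, hdpcons, hgetp]
        rw [show bLineTags ('<' :: List.drop (p + 1) line) none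
            = bLineTags (List.drop (p + 1) line) (some ['<']) by simp [bLineTags]]
        rw [ht1', bLineTags_some_no_gt _ _ hmem2']
        have h2' : PySem.Chars.findFrom line ['>'] (PySem.Chars.findFrom line ['<'] (start : Int)) = -1 := by
          rw [hfpc]; exact h2
        simp [aTagLoop, h1, h2']
      · obtain ⟨hge2, hpref2, hmin2⟩ :=
          PySem.Chars.findFrom_natCast_spec line ['>'] p (le_of_lt hplen) h2
        have hfqnn : (0 : Int) ≤ PySem.Chars.findFrom line ['>'] ((p : Nat) : Int) :=
          le_trans (by exact_mod_cast Nat.zero_le p) hge2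
        set q := (PySem.Chars.findFrom line ['>'] ((p : Nat) : Int)).toNat with hq
        have hfqc : PySem.Chars.findFrom line ['>'] ((p : Nat) : Int) = (q : Int) :=
          (Int.toNat_of_nonneg hfqnn).symm
        obtain ⟨t2, ht2⟩ := single_prefix hpref2
        have hqlen : q < line.length :=
          List.length_lt_of_drop_ne_nil (by rw [ht2]; simp)
        have hdqcons := List.drop_eq_getElem_cons hqlen
        rw [hdqcons] at ht2
        obtain ⟨hgetq, ht2'⟩ := List.cons_eq_cons.mp ht2
        have hpq : p ≤ q := by
          have := hge2; rw [hfqc] at this; exact_mod_cast this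
        have hpq' : p < q := by
          rcases Nat.lt_or_ge p q with h | h
          · exact h
          · exfalso
            have hpe : p = q := le_antisymm hpq h
            simp only [hpe] at hgetp
            rw [hgetp] at hgetq
            exact absurd hgetq (by decide)
        -- the tag's interior
        set mid := (line.drop (p + 1)).take (q - (p + 1)) with hmid
        have hmidlen : mid.length = q - (p + 1) := by
          simp [hmid, List.length_take, List.length_drop]
          omega
        have hnogt : '>' ∉ mid :=
          not_mem_mid line '>' (p + 1) q (fun j hj1 hj2 => hmin2 j (by omega) hj2)
        have hdropp1 : line.drop (p + 1) = mid ++ '>' :: line.drop (q + 1) := by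
          conv_lhs => rw [← List.take_append_drop (q - (p + 1)) (line.drop (p + 1))]
          rw [List.drop_drop]
          congr 1
          rw [show p + 1 + (q - (p + 1)) = q by omega]
          rw [hdqcons, hgetq]
        have hdropp : line.drop p = '<' :: (mid ++ '>' :: line.drop (q + 1)) := by
          rw [hdpcons, hgetp, hdropp1]
        -- the extracted tag
        have htagval : PySem.List.slice line (some ((p : Nat) : Int)) (some (((q : Nat) : Int) + 1))
            = '<' :: (mid ++ ['>']) := by
          rw [show ((q : Nat) : Int) + 1 = (((q + 1 : Nat)) : Int) by push_cast; ring]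
          rw [PySem.List.slice_natCast]
          rw [hdropp]
          rw [show q + 1 - p = mid.length + 2 by omega]
          simp [List.take_append]
        -- scanner view of the suffix
        have hscan : bLineTags (line.drop start) none
            = ('<' :: (mid ++ ['>'])) :: bLineTags (line.drop (q + 1)) none := by
          rw [hsplit, bLineTags_skip _ _ hnolt, hdropp]
          rw [show bLineTags ('<' :: (mid ++ '>' :: line.drop (q + 1))) none
              = bLineTags (mid ++ '>' :: line.drop (q + 1)) (some ['<']) by simp [bLineTags]]
          rw [bLineTags_emit _ _ _ hnogt]
          simp
        -- invariants for the recursive call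
        have hstart' : q + 1 ≤ line.length := hqlen
        have hfuel' : line.length - (q + 1) < fuel := by omega
        have hih := fun st' => ih (q + 1) st' hstart' hfuel'
        have hp1 : ¬ (((p : Nat) : Int) = -1) := by omega
        have hq1 : ¬ (((q : Nat) : Int) = -1) := by omega
        rw [hscan]
        simp only [List.map_cons, List.foldl_cons]
        -- unfold one step of A's loop and resolve the two find guards
        conv_lhs => rw [aTagLoop]
        rw [hfpc, if_neg hp1, hfqc, if_neg hq1, htagval]
        rw [show (((q : Nat) : Int) + 1).toNat = q + 1 by omega]
        set tag := '<' :: (mid ++ ['>']) with htag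
        -- unfold one step of B's classifier
        simp only [bStep]
        by_cases hb1 : PySem.Chars.startswith tag (("<!--").toList) = true
        · rw [if_pos hb1, if_pos hb1, hih st]
        · rw [if_neg hb1, if_neg hb1]
          by_cases hb2 : PySem.Chars.startswith tag (("</").toList) = true
          · rw [if_pos hb2, if_pos hb2]
            by_cases hb3 : st.2 ≠ [] ∧ PySem.List.pyGet? st.2 (-1)
                = some (PySem.Chars.strip (PySem.List.slice tag (some 2) (some (-1))))
            · rw [if_pos hb3, if_pos hb3, hih (st.1, st.2.dropLast)]
            · rw [if_neg hb3, if_neg hb3, hih (st.1 ++ [pvUnmatchedMsg fname i tag], st.2)]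
          · rw [if_neg hb2, if_neg hb2]
            by_cases hb4 : ¬ PySem.Chars.endswith tag (("/>").toList) = true
                ∧ ¬ PySem.Chars.startswith tag (("<!").toList) = true
            · rw [if_pos hb4, if_pos hb4]
              have hsl : PySem.List.slice tag (some 1) (some (-1)) = mid := slice_1_neg1 '<' '>' mid
              rcases hps : PySem.Chars.split₀ (PySem.List.slice tag (some 1) (some (-1))) with _ | ⟨n, rest'⟩
              · -- Python raises IndexError here; excluded by Pre_
                exfalso
                have hws : ∀ c ∈ mid, PySem.Chars.isspace c = true := by
                  rw [hsl] at hps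
                  exact split₀_eq_nil mid hps
                have hclose : pvWsClose (mid ++ '>' :: line.drop (q + 1)) = true :=
                  pvWsClose_of_ws _ _ hws
                have htrue : pvHasWsTag line = true := by
                  rw [show line = line.take p ++ '<' :: (mid ++ '>' :: line.drop (q + 1)) by
                    conv_lhs => rw [← List.take_append_drop p line]
                    rw [hdropp]]
                  exact pvHasWsTag_of_close _ _ hclose
                rw [hpre] at htrue
                exact Bool.noConfusion htrue
              · simp only [List.headD_cons]
                by_cases hb5 : n ∈ pvVoids
                · rw [if_pos hb5, if_pos hb5, hih st]
                · rw [if_neg hb5, if_neg hb5, hih (st.1, st.2 ++ [n])]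
            · rw [if_neg hb4, if_neg hb4, hih st]

-- ===== VERDICT (by name: the statement is the Claim_ definition above) =====
theorem check_html_syntax_py_spec : Claim_equal_check_html_syntax_py := by
  unfold Claim_equal_check_html_syntax_py
  intro content file_name hdom hpre
  unfold Spec_check_html_syntax_py check_html_syntax_py check_html_syntax_py_alt
  dsimp only
  rw [List.foldl_flatMap]
  have hfold : ∀ (st : List String × List (List Char))
      (p : Int × List Char), p ∈ PySem.List.enumerate (PySem.Chars.splitOn content.toList ['\n']) 1 →
      (if PySem.Chars.isIn ['<'] (PySem.Chars.strip p.2) && PySem.Chars.isIn ['>'] (PySem.Chars.strip p.2) then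
        aTagLoop file_name.toList p.1 (PySem.Chars.strip p.2) 0 st.1 st.2 ((PySem.Chars.strip p.2).length + 1)
      else st)
      = ((bLineTags (PySem.Chars.strip p.2) none).map (fun t => (p.1, t))).foldl (bStep file_name.toList) st := by
    intro st p hp
    have hmem : p.2 ∈ PySem.Chars.splitOn content.toList ['\n'] := by
      rcases (PySem.List.mem_enumerate_iff _ _ _).mp hp with ⟨k, hk, hpk⟩
      rw [hpk]
      exact List.getElem_mem hk
    have hpre' : pvHasWsTag (PySem.Chars.strip p.2) = false := hpre p.2 hmem
    by_cases hg : PySem.Chars.isIn ['<'] (PySem.Chars.strip p.2) && PySem.Chars.isIn ['>'] (PySem.Chars.strip p.2)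
    · rw [if_pos hg]
      have := aTagLoop_eq file_name.toList p.1 (PySem.Chars.strip p.2) hpre'
        ((PySem.Chars.strip p.2).length + 1) 0 st (Nat.zero_le _) (by omega)
      simpa using this
    · rw [if_neg hg]
      rcases Bool.and_eq_false_iff.mp (Bool.eq_false_iff.mpr hg) with h | h
      · have : '<' ∉ PySem.Chars.strip p.2 := by
          intro hm
          have := (PySem.Chars.isIn_iff_infix _ _).mpr ((List.singleton_infix_iff _ _).mpr hm)
          rw [h] at this
          exact Bool.noConfusion this
        rw [bLineTags_none_no_lt _ this]
        rfl
      · have : '>' ∉ PySem.Chars.strip p.2 := by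
          intro hm
          have := (PySem.Chars.isIn_iff_infix _ _).mpr ((List.singleton_infix_iff _ _).mpr hm)
          rw [h] at this
          exact Bool.noConfusion this
        rw [bLineTags_none_no_gt _ this]
        rfl
  rw [PySem.List.foldl_congr_mem _ _ _ _ hfold]
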